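-- pv_equiv track=rewrite | github.com/JuRehl/Teoria-De-algoritmos-buchwald-FIUBA | Primer parcial/Programacion dinamica/juan_el_vago.py | reconstruir
-- ===== SOURCE A (Python) =====
-- def reconstruir(G,trabajos):
--     result=[]
--     d=len(G)-1
--     while d>=0:
--         opt_ayer=G[d-1] if d>0 else 0
--         opt_anteayer=G[d-2] if d>1 else 0
--         hoy=trabajos[d]
--         if opt_anteayer+hoy>opt_ayer:
--             result.append(d)
--             d-=2
--         else:
--             d-=1
--     result.reverse()
--     return result
-- ===== SOURCE B (Python) =====
-- def reconstruir(G, trabajos):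
--     # Forward DP: chain R[d] = R[d-2]+(d,) if taking day d wins, else R[d-1],
--     # kept as persistent linked lists (parent, d); only prev/prev2 are live.
--     prev2 = None  # chain for R[d-2]
--     prev = None   # chain for R[d-1]
--     for d in range(len(G)):
--         opt_ayer = G[d-1] if d > 0 else 0
--         opt_anteayer = G[d-2] if d > 1 else 0
--         if opt_anteayer + trabajos[d] > opt_ayer:
--             cur = (prev2, d)
--         else:
--             cur = prev
--         prev2, prev = prev, cur
--     result = []
--     node = prev
--     while node is not None:
--         node, d = node
--         result.append(d)
--     result.reverse()
--     return result
-- ===== Notes on version B (the rewrite author's own statement) =====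
-- stated objective: alternative
-- what changed: Replaces the backward while-loop traceback with append-and-reverse by a forward DP over the recurrence keeping persistent linked-list chains (prev/prev2) and a final unwind of the winning chain.
import Mathlib
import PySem

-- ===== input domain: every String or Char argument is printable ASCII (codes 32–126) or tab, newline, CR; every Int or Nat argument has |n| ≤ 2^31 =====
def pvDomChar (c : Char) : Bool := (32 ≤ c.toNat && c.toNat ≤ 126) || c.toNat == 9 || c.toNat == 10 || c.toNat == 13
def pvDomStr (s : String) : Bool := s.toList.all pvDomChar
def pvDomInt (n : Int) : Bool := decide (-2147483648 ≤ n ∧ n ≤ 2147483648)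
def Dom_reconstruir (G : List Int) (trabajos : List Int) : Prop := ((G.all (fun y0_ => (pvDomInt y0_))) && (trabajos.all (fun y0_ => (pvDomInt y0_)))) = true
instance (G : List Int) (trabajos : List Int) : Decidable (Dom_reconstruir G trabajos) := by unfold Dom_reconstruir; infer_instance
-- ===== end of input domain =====

-- B replaces A's backward traceback (mutable accumulator + final reverse) by a forward DP with
-- persistent linked-list chains over the same recurrence; same O(n) cost, different decomposition.


-- ===== PORT A =====
-- Transliteration of A's while-loop: state (result, d); indexing via pyGet? (in range on Pre_).
def recA (G trabajos : List Int) (result : List Int) (d : Int) : List Int :=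
  if d ≥ 0 then
    let opt_ayer := if d > 0 then (PySem.List.pyGet? G (d-1)).getD 0 else 0
    let opt_anteayer := if d > 1 then (PySem.List.pyGet? G (d-2)).getD 0 else 0
    let hoy := (PySem.List.pyGet? trabajos d).getD 0
    if opt_anteayer + hoy > opt_ayer then recA G trabajos (result ++ [d]) (d-2)
    else recA G trabajos result (d-1)
  else result.reverse
termination_by (d+1).toNat
decreasing_by all_goals omega

def reconstruir (G : List Int) (trabajos : List Int) : List Int :=
  recA G trabajos [] ((G.length : Int) - 1)

-- ===== PORT B =====
-- The chain tuple (parent, d) is ported as the list d :: parent (None = []); the final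
-- unwind-while-loop is unwindB; indexing via pyGet? (in range on Pre_).
def unwindB : List Int → List Int → List Int
  | [], acc => acc
  | d :: rest, acc => unwindB rest (acc ++ [d])

def reconstruir_alt (G : List Int) (trabajos : List Int) : List Int :=
  let st := (PySem.List.pyRange 0 (G.length) 1).foldl (fun (st : List Int × List Int) d =>
    let opt_ayer := if d > 0 then (PySem.List.pyGet? G (d-1)).getD 0 else 0
    let opt_anteayer := if d > 1 then (PySem.List.pyGet? G (d-2)).getD 0 else 0
    let cur := if opt_anteayer + (PySem.List.pyGet? trabajos d).getD 0 > opt_ayer then d :: st.1 else st.2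
    (st.2, cur)) ([], [])
  (unwindB st.2 []).reverse

-- ===== PRECONDITION & SPEC =====
-- A (and B) index trabajos[len(G)-1] first, so both raise IndexError when 0 < |G| and |trabajos| < |G|.
def Pre_reconstruir (G : List Int) (trabajos : List Int) : Prop :=
  G = [] ∨ G.length ≤ trabajos.length
instance (G : List Int) (trabajos : List Int) : Decidable (Pre_reconstruir G trabajos) := by
  unfold Pre_reconstruir; infer_instance
def pvWitness_reconstruir : List Int × List Int := ([1, 3, 4], [1, 2, 1])
def Spec_reconstruir (G : List Int) (trabajos : List Int) (out : List Int) : Prop := out = reconstruir_alt G trabajos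
instance (G : List Int) (trabajos : List Int) (out : List Int) : Decidable (Spec_reconstruir G trabajos out) := by unfold Spec_reconstruir; infer_instance

-- ===== CLAIM (what is proved, stated in full; the proofs are below) =====
def Claim_equal_reconstruir : Prop := ∀ (G : List Int) (trabajos : List Int), Dom_reconstruir G trabajos → Pre_reconstruir G trabajos → Spec_reconstruir G trabajos (reconstruir G trabajos)

-- ===== LEMMAS AND PROOFS =====
-- Proof-side DP recurrence: recB n = the chosen days for the prefix of length n (ascending).
def recB (G trabajos : List Int) : Nat → List Int
  | 0 => []
  | n+1 =>
    let opt_ayer := if n > 0 then G.getD (n-1) 0 else 0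
    let opt_anteayer := if n > 1 then G.getD (n-2) 0 else 0
    if opt_anteayer + trabajos.getD n 0 > opt_ayer then recB G trabajos (n-1) ++ [(n : Int)]
    else recB G trabajos n

lemma recA_neg (G trabajos acc : List Int) (d : Int) (h : d < 0) :
    recA G trabajos acc d = acc.reverse := by
  rw [recA]; simp [not_le.mpr h]

lemma pyGetD_bridge (xs : List Int) (k : Nat) :
    (PySem.List.pyGet? xs ((k : Nat) : Int)).getD 0 = xs.getD k 0 := by
  rw [PySem.List.pyGet?_natCast, List.getD_eq_getElem?_getD]

lemma key (G trabajos : List Int) : ∀ (n : Nat) (acc : List Int),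
    recA G trabajos acc ((n : Int) - 1) = recB G trabajos n ++ acc.reverse := by
  intro n
  induction n using Nat.strong_induction_on with
  | _ n ih =>
    intro acc
    match n with
    | 0 => rw [recA_neg _ _ _ _ (by norm_num)]; simp [recB]
    | n+1 =>
      rw [recA]
      have hd : ((n+1 : Nat) : Int) - 1 = (n : Nat) := by push_cast; ring
      rw [hd]
      simp only [recB]
      have hG1 : (n > 0) → (PySem.List.pyGet? G ((n : Int) - 1)).getD 0 = G.getD (n-1) 0 := by
        intro h
        have : ((n : Nat) : Int) - 1 = ((n - 1 : Nat) : Int) := by omega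
        rw [this, pyGetD_bridge]
      have hG2 : (n > 1) → (PySem.List.pyGet? G ((n : Int) - 2)).getD 0 = G.getD (n-2) 0 := by
        intro h
        have : ((n : Nat) : Int) - 2 = ((n - 2 : Nat) : Int) := by omega
        rw [this, pyGetD_bridge]
      have hge : ((n : Nat) : Int) ≥ 0 := by positivity
      rw [if_pos hge]
      simp only [pyGetD_bridge]
      by_cases h1 : n > 0
      · simp only [if_pos h1, if_pos (by exact_mod_cast h1 : ((n:Nat):Int) > 0), hG1 h1]
        by_cases h2 : n > 1
        · simp only [if_pos h2, if_pos (by exact_mod_cast h2 : ((n:Nat):Int) > 1), hG2 h2]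
          split
          · have : ((n : Nat) : Int) - 2 = ((n - 1 : Nat) : Int) - 1 := by omega
            rw [this, ih (n-1) (by omega)]
            simp
          · rw [ih n (by omega)]
        · have h2' : ¬ (((n:Nat):Int) > 1) := by omega
          simp only [if_neg h2, if_neg h2']
          split
          · have : ((n : Nat) : Int) - 2 = ((n - 1 : Nat) : Int) - 1 := by omega
            rw [this, ih (n-1) (by omega)]
            simp
          · rw [ih n (by omega)]
      · have h1' : ¬ (((n:Nat):Int) > 0) := by omega
        have h2 : ¬ (n > 1) := by omega
        have h2' : ¬ (((n:Nat):Int) > 1) := by omega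
        simp only [if_neg h1, if_neg h1', if_neg h2, if_neg h2']
        split
        · have hn0 : n = 0 := by omega
          subst hn0
          rw [show ((0:Nat):Int) - 2 = (-2 : Int) by norm_num, recA_neg _ _ _ _ (by norm_num)]
          simp [recB]
        · rw [ih n (by omega)]

lemma unwindB_eq : ∀ (ch acc : List Int), unwindB ch acc = acc ++ ch := by
  intro ch
  induction ch with
  | nil => simp [unwindB]
  | cons d rest ih => intro acc; rw [unwindB, ih]; simp

-- The forward fold's state after the first n days is the pair of reversed recB-chains.
lemma fwd (G trabajos : List Int) (n : Nat) :
    (PySem.List.pyRange 0 n 1).foldl (fun (st : List Int × List Int) d =>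
      let opt_ayer := if d > 0 then (PySem.List.pyGet? G (d-1)).getD 0 else 0
      let opt_anteayer := if d > 1 then (PySem.List.pyGet? G (d-2)).getD 0 else 0
      let cur := if opt_anteayer + (PySem.List.pyGet? trabajos d).getD 0 > opt_ayer then d :: st.1 else st.2
      (st.2, cur)) ([], [])
    = ((recB G trabajos (n-1)).reverse, (recB G trabajos n).reverse) := by
  induction n with
  | zero => simp [PySem.List.pyRange, recB]
  | succ n ih =>
    rw [show (((n+1 : Nat)):Int) = (n:Int)+1 by push_cast; ring,
        PySem.List.pyRange_one_succ_right (by positivity), List.foldl_append, ih]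
    simp only [List.foldl_cons, List.foldl_nil]
    have hG1 : (n > 0) → (PySem.List.pyGet? G (((n:Nat):Int) - 1)).getD 0 = G.getD (n-1) 0 := by
      intro h
      have : ((n : Nat) : Int) - 1 = ((n - 1 : Nat) : Int) := by omega
      rw [this, pyGetD_bridge]
    have hG2 : (n > 1) → (PySem.List.pyGet? G (((n:Nat):Int) - 2)).getD 0 = G.getD (n-2) 0 := by
      intro h
      have : ((n : Nat) : Int) - 2 = ((n - 2 : Nat) : Int) := by omega
      rw [this, pyGetD_bridge]
    simp only [pyGetD_bridge]
    conv_rhs => rw [show n + 1 - 1 = n from rfl]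
    conv_rhs => rw [recB]
    by_cases h1 : n > 0
    · simp only [if_pos h1, if_pos (by exact_mod_cast h1 : ((n:Nat):Int) > 0), hG1 h1]
      by_cases h2 : n > 1
      · simp only [if_pos h2, if_pos (by exact_mod_cast h2 : ((n:Nat):Int) > 1), hG2 h2]
        split <;> simp
      · have h2' : ¬ (((n:Nat):Int) > 1) := by omega
        simp only [if_neg h2, if_neg h2']
        split <;> simp
    · have h1' : ¬ (((n:Nat):Int) > 0) := by omega
      have h2 : ¬ (n > 1) := by omega
      have h2' : ¬ (((n:Nat):Int) > 1) := by omega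
      simp only [if_neg h1, if_neg h1', if_neg h2, if_neg h2']
      split <;> simp

-- ===== VERDICT (by name: the statement is the Claim_ definition above) =====
theorem reconstruir_spec : Claim_equal_reconstruir := by
  intro G trabajos _ _
  unfold Spec_reconstruir reconstruir reconstruir_alt
  rw [key, fwd]
  simp only []
  rw [unwindB_eq]
  simp
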